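-- pv_equiv track=rewrite | github.com/Voldek404/High-school-of-programming | 28/task22.py | SherlockValidString
-- ===== SOURCE A (Python) =====
-- def SherlockValidString(s: str) -> bool:
--     char_count = {}
--     for char in s:
--         char_count[char] = char_count.get(char, 0) + 1
--     freq_count = {}
--     for count in char_count.values():
--         freq_count[count] = freq_count.get(count, 0) + 1
--     if len(freq_count) == 1:
--         return True
--     if len(freq_count) == 2:
--         min_freq = min(freq_count)
--         max_freq = max(freq_count)
--         if max_freq == min_freq + 1 and freq_count[max_freq] == 1:
--             return True
--         if min_freq == 1 and freq_count[min_freq] == 1: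
--             return True
--     return False
-- ===== SOURCE B (Python) =====
-- def all_equal(lst):
--     return all(v == lst[0] for v in lst[1:])
--
--
-- def SherlockValidString(s: str) -> bool:
--     counts = {}
--     for ch in s:
--         counts[ch] = counts.get(ch, 0) + 1
--     vals = list(counts.values())
--     if not vals:
--         return False
--     if all_equal(vals):
--         return True
--     for i in range(len(vals)):
--         rest = vals[:i] + vals[i + 1:]
--         if vals[i] > 1:
--             rest.append(vals[i] - 1)
--         if all_equal(rest):
--             return True
--     return False
-- ===== Notes on version B (the rewrite author's own statement) =====
-- stated objective: alternative
-- what changed: Replaces A's frequency-of-frequencies table with its two min/max special cases by a generate-and-test loop: for each position in the list of character counts, delete one occurrence of that count (dropping it entirely when it is 1) and accept iff some deletion (or no deletion) leaves all counts equal.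
import Mathlib
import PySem

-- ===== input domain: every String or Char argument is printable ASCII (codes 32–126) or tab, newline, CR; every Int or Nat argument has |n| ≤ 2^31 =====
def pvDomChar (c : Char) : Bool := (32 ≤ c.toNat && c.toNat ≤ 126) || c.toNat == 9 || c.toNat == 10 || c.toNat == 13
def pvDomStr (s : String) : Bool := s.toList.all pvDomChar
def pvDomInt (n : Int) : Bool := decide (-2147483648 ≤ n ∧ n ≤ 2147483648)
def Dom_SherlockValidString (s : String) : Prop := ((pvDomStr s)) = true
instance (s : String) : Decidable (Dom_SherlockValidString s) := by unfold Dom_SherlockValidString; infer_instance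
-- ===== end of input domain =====

-- B replaces A's frequency-of-frequencies table (with its min/max special cases) by a
-- generate-and-test deletion loop over the character counts; alternative decomposition, not faster.

-- ===== PORT A =====
-- A's decision on the list of character counts: build the count-of-counts dict and test its shape.
def sherFreqDecide (vals : List Int) : Bool :=
  let freqCount := vals.foldl (fun d v => d.insert v (d.getD v 0 + 1)) (PySem.Dict.empty : PySem.Dict Int Int)
  if freqCount.size = 1 then true
  else if freqCount.size = 2 then
    -- min(freq_count) / max(freq_count): the key list is nonempty here (size 2), so the Option default is never used
    let minFreq := (PySem.List.min? freqCount.keys (fun x => x)).getD 0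
    let maxFreq := (PySem.List.max? freqCount.keys (fun x => x)).getD 0
    if maxFreq == minFreq + 1 && freqCount.getD maxFreq 0 == 1 then true
    else if minFreq == 1 && freqCount.getD minFreq 0 == 1 then true
    else false
  else false

def SherlockValidString (s : String) : Bool :=
  sherFreqDecide ((s.toList.foldl (fun d c => d.insert c (d.getD c 0 + 1)) (PySem.Dict.empty : PySem.Dict Char Int)).values)

-- ===== PORT B =====
-- all(v == lst[0] for v in lst[1:])  (vacuously true on [] — lst[0] is never evaluated then)
def pyAllEqual (l : List Int) : Bool :=
  match l with
  | [] => true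
  | x :: xs => xs.all (fun v => v == x)

-- B's decision on the list of character counts: try deleting one occurrence of each count.
def sherDeleteDecide (vals : List Int) : Bool :=
  if vals.isEmpty then false
  else if pyAllEqual vals then true
  else (PySem.List.pyRange 0 (PySem.List.len vals) 1).any (fun i =>
    let rest := PySem.List.slice vals none (some i) ++ PySem.List.slice vals (some (i + 1)) none
    let rest2 := if PySem.List.pyGetD vals i 0 > 1 then rest ++ [PySem.List.pyGetD vals i 0 - 1] else rest
    pyAllEqual rest2)

def SherlockValidString_alt (s : String) : Bool :=
  sherDeleteDecide ((s.toList.foldl (fun d c => d.insert c (d.getD c 0 + 1)) (PySem.Dict.empty : PySem.Dict Char Int)).values)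

-- ===== PRECONDITION & SPEC =====
def Spec_SherlockValidString (s : String) (out : Bool) : Prop := out = SherlockValidString_alt s
instance (s : String) (out : Bool) : Decidable (Spec_SherlockValidString s out) := by unfold Spec_SherlockValidString; infer_instance

-- ===== CLAIM (what is proved, stated in full; the proofs are below) =====
def Claim_equal_SherlockValidString : Prop := ∀ (s : String), Dom_SherlockValidString s → Spec_SherlockValidString s (SherlockValidString s)

-- ===== LEMMAS AND PROOFS =====

lemma pyAllEqual_iff (l : List Int) : pyAllEqual l = true ↔ ∀ x ∈ l, ∀ y ∈ l, x = y := by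
  cases l with
  | nil => simp [pyAllEqual]
  | cons x xs =>
    simp only [pyAllEqual, List.all_eq_true, beq_iff_eq]
    constructor
    · intro h a ha b hb
      have hax : a = x := by rcases List.mem_cons.mp ha with h' | h' <;> [exact h'; exact h a h']
      have hbx : b = x := by rcases List.mem_cons.mp hb with h' | h' <;> [exact h'; exact h b h']
      omega
    · intro h v hv
      exact h v (List.mem_cons_of_mem _ hv) x (List.mem_cons_self)

-- counting through the one-element deletion at index i
lemma count_del (vals : List Int) (i : Nat) (h : i < vals.length) (v : Int) :
    vals.count v = ((vals.take i ++ vals.drop (i + 1)).count v) + (if vals[i] = v then 1 else 0) := by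
  conv_lhs => rw [← List.take_append_drop i vals, List.drop_eq_getElem_cons h]
  simp only [List.count_append, List.count_cons, beq_iff_eq]
  split_ifs <;> omega

lemma mem_del_of_ne (vals : List Int) (i : Nat) (h : i < vals.length) (v : Int)
    (hv : v ∈ vals) (hne : vals[i] ≠ v) : v ∈ vals.take i ++ vals.drop (i + 1) := by
  have := count_del vals i h v
  rw [if_neg hne] at this
  have hc : 0 < vals.count v := List.count_pos_iff.mpr hv
  exact List.count_pos_iff.mp (by omega)

lemma mem_of_mem_del (vals : List Int) (i : Nat) (v : Int)
    (hv : v ∈ vals.take i ++ vals.drop (i + 1)) : v ∈ vals := by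
  rcases List.mem_append.mp hv with h | h
  · exact List.mem_of_mem_take h
  · exact List.mem_of_mem_drop h

-- the body of B's any-loop, at a natural index
lemma body_eq (vals : List Int) (k : Nat) (hk : k < vals.length) :
    (let rest := PySem.List.slice vals none (some ((k : Int))) ++ PySem.List.slice vals (some ((k : Int) + 1)) none
     let rest2 := if PySem.List.pyGetD vals ((k : Int)) 0 > 1 then rest ++ [PySem.List.pyGetD vals ((k : Int)) 0 - 1] else rest
     pyAllEqual rest2)
    = pyAllEqual ((vals.take k ++ vals.drop (k + 1)) ++ (if 1 < vals[k] then [vals[k] - 1] else [])) := by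
  have h1 : PySem.List.slice vals none (some (k : Int)) = vals.take k := PySem.List.slice_to_natCast vals k
  have h2 : PySem.List.slice vals (some ((k : Int) + 1)) none = vals.drop (k + 1) := by
    have := PySem.List.slice_from_natCast vals (k + 1)
    push_cast at this
    exact this
  have h3 : PySem.List.pyGetD vals (k : Int) 0 = vals[k] := by
    rw [PySem.List.pyGetD_natCast]
    exact List.getD_eq_getElem vals 0 hk
  simp only [h1, h2, h3]
  split_ifs with h
  · rfl
  · simp

lemma sherDelete_any_iff (vals : List Int) :
    ((PySem.List.pyRange 0 (PySem.List.len vals) 1).any (fun i =>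
      let rest := PySem.List.slice vals none (some i) ++ PySem.List.slice vals (some (i + 1)) none
      let rest2 := if PySem.List.pyGetD vals i 0 > 1 then rest ++ [PySem.List.pyGetD vals i 0 - 1] else rest
      pyAllEqual rest2) = true)
    ↔ ∃ k, ∃ (hk : k < vals.length),
        pyAllEqual ((vals.take k ++ vals.drop (k + 1)) ++ (if 1 < vals[k] then [vals[k] - 1] else [])) = true := by
  rw [show PySem.List.len vals = ((vals.length : Int)) from PySem.List.len_eq vals,
    PySem.List.pyRange_zero_natCast, List.any_map, List.any_eq_true]
  constructor
  · rintro ⟨k, hk, hbody⟩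
    have hk' : k < vals.length := List.mem_range.mp hk
    refine ⟨k, hk', ?_⟩
    rw [← body_eq vals k hk']
    exact hbody
  · rintro ⟨k, hk', hbody⟩
    refine ⟨k, List.mem_range.mpr hk', ?_⟩
    show (let rest := PySem.List.slice vals none (some ((k : Int))) ++ PySem.List.slice vals (some ((k : Int) + 1)) none
          let rest2 := if PySem.List.pyGetD vals ((k : Int)) 0 > 1 then rest ++ [PySem.List.pyGetD vals ((k : Int)) 0 - 1] else rest
          pyAllEqual rest2) = true
    rw [body_eq vals k hk']
    exact hbody

lemma ite_ite_or (x y : Bool) : (if x = true then true else if y = true then true else false) = (x || y) := by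
  cases x <;> cases y <;> simp

-- A's decision when there is exactly one distinct count
lemma freq_k1 (vals : List Int) (a : Int) (hS : PySem.Set.ofList vals = [a]) :
    sherFreqDecide vals = true := by
  unfold sherFreqDecide
  rw [PySem.Dict.foldl_insert_getD_add_one_eq_counter]
  have hsz : (PySem.Dict.counter vals).size = 1 := by
    simp [PySem.Dict.size, PySem.Dict.items_counter, hS]
  rw [if_pos hsz]

-- B's decision when all counts are equal
lemma del_k1 (vals : List Int) (a : Int) (ha : a ∈ vals) (hall : ∀ v ∈ vals, v = a) :
    sherDeleteDecide vals = true := by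
  unfold sherDeleteDecide
  have h1 : vals.isEmpty = false := by
    cases vals with
    | nil => cases ha
    | cons x xs => rfl
  have h2 : pyAllEqual vals = true := (pyAllEqual_iff vals).mpr
    (fun x hx y hy => by rw [hall x hx, hall y hy])
  rw [h1, h2]
  simp

-- A's decision when there are exactly two distinct counts
lemma freq_k2 (vals : List Int) (a b : Int) (hS : PySem.Set.ofList vals = [a, b]) :
    sherFreqDecide vals =
      ((max a b == min a b + 1 && ((vals.count (max a b) : Int) == 1))
        || (min a b == 1 && ((vals.count (min a b) : Int) == 1))) := by
  unfold sherFreqDecide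
  rw [PySem.Dict.foldl_insert_getD_add_one_eq_counter]
  have hsz : (PySem.Dict.counter vals).size = 2 := by
    simp [PySem.Dict.size, PySem.Dict.items_counter, hS]
  have hkeys : (PySem.Dict.counter vals).keys = [a, b] := by
    rw [PySem.Dict.keys_counter, hS]
  rw [if_neg (by omega), if_pos hsz]
  simp only [hkeys, PySem.List.min?_id_cons, PySem.List.max?_id_cons, List.foldl_cons,
    List.foldl_nil, Option.getD_some, PySem.Dict.getD_counter]
  exact ite_ite_or _ _

-- A's decision when there are three or more distinct counts
lemma freq_k3 (vals : List Int) (a b c : Int) (rest : List Int)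
    (hS : PySem.Set.ofList vals = a :: b :: c :: rest) :
    sherFreqDecide vals = false := by
  unfold sherFreqDecide
  rw [PySem.Dict.foldl_insert_getD_add_one_eq_counter]
  have hsz : (PySem.Dict.counter vals).size = rest.length + 3 := by
    simp [PySem.Dict.size, PySem.Dict.items_counter, hS]
  rw [if_neg (by omega), if_neg (by omega)]

-- B's decision when there are three or more distinct counts: no single deletion can help
lemma del_k3 (vals : List Int) (a b c : Int) (ha : a ∈ vals) (hb : b ∈ vals) (hc : c ∈ vals)
    (hab : a ≠ b) (hac : a ≠ c) (hbc : b ≠ c) :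
    sherDeleteDecide vals = false := by
  unfold sherDeleteDecide
  split_ifs with h1 h2
  · rfl
  · exact absurd ((pyAllEqual_iff vals).mp h2 a ha b hb) hab
  · rw [← Bool.not_eq_true, sherDelete_any_iff]
    rintro ⟨k, hk, hAE⟩
    rw [pyAllEqual_iff] at hAE
    -- pick two of a, b, c different from vals[k]
    obtain ⟨u, w, hu, hw, huw, hku, hkw⟩ :
        ∃ u w, u ∈ vals ∧ w ∈ vals ∧ u ≠ w ∧ vals[k] ≠ u ∧ vals[k] ≠ w := by
      by_cases hka : vals[k] = a
      · exact ⟨b, c, hb, hc, hbc, by rw [hka]; exact hab, by rw [hka]; exact hac⟩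
      · by_cases hkb : vals[k] = b
        · exact ⟨a, c, ha, hc, hac, hka, by rw [hkb]; exact hbc⟩
        · exact ⟨a, b, ha, hb, hab, hka, hkb⟩
    have hu' : u ∈ vals.take k ++ vals.drop (k + 1) := mem_del_of_ne vals k hk u hu hku
    have hw' : w ∈ vals.take k ++ vals.drop (k + 1) := mem_del_of_ne vals k hk w hw hkw
    exact huw (hAE u (List.mem_append_left _ hu') w (List.mem_append_left _ hw'))

-- B's decision when there are exactly two distinct counts m < M
lemma del_k2 (vals : List Int) (m M : Int) (hmM : m < M)
    (hmv : m ∈ vals) (hMv : M ∈ vals) (hall : ∀ v ∈ vals, v = m ∨ v = M)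
    (hpos : ∀ v ∈ vals, 1 ≤ v) :
    sherDeleteDecide vals =
      ((M == m + 1 && ((vals.count M : Int) == 1)) || (m == 1 && ((vals.count m : Int) == 1))) := by
  unfold sherDeleteDecide
  split_ifs with h1 h2
  · rw [List.isEmpty_iff] at h1
    rw [h1] at hmv
    cases hmv
  · exact absurd ((pyAllEqual_iff vals).mp h2 m hmv M hMv) (ne_of_lt hmM)
  · rw [Bool.eq_iff_iff, sherDelete_any_iff]
    simp only [Bool.or_eq_true, Bool.and_eq_true, beq_iff_eq]
    have hm1 : 1 ≤ m := hpos m hmv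
    constructor
    · rintro ⟨k, hk, hAE⟩
      rw [pyAllEqual_iff] at hAE
      have hkmem : vals[k] ∈ vals := List.getElem_mem hk
      have hcd := fun v => count_del vals k hk v
      by_cases hx : 1 < vals[k]
      · -- deletion decrements vals[k]; everything left equals vals[k] - 1
        rw [if_pos hx] at hAE
        have her : ∀ v ∈ vals.take k ++ vals.drop (k + 1), v = vals[k] - 1 := by
          intro v hv
          exact hAE v (List.mem_append_left _ hv) (vals[k] - 1)
            (List.mem_append_right _ (List.mem_singleton.mpr rfl))
        have hxM : vals[k] = M := by
          rcases hall _ hkmem with h | h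
          · exfalso
            have hM' : M ∈ vals.take k ++ vals.drop (k + 1) :=
              mem_del_of_ne vals k hk M hMv (by omega)
            have := her M hM'
            omega
          · exact h
        have hmem' : m ∈ vals.take k ++ vals.drop (k + 1) :=
          mem_del_of_ne vals k hk m hmv (by omega)
        have hMm : M = m + 1 := by have := her m hmem'; omega
        have hcnt : vals.count M = 1 := by
          have h0 := hcd M
          rw [if_pos hxM] at h0
          by_cases hMr : M ∈ vals.take k ++ vals.drop (k + 1)
          · exfalso; have := her M hMr; omega
          · have : (vals.take k ++ vals.drop (k + 1)).count M = 0 :=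
              List.count_eq_zero.mpr hMr
            have hc1 : 0 < vals.count M := List.count_pos_iff.mpr hMv
            omega
        exact Or.inl ⟨hMm, by exact_mod_cast hcnt⟩
      · -- vals[k] = 1 : the element is deleted entirely
        rw [if_neg hx] at hAE
        have hk1 : vals[k] = 1 := by have := hpos _ hkmem; omega
        have hxm : vals[k] = m := by
          rcases hall _ hkmem with h | h
          · exact h
          · omega
        have hM' : M ∈ vals.take k ++ vals.drop (k + 1) :=
          mem_del_of_ne vals k hk M hMv (by omega)
        have hcnt : vals.count m = 1 := by
          have h0 := hcd m
          rw [if_pos hxm] at h0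
          by_cases hmr : m ∈ vals.take k ++ vals.drop (k + 1)
          · exfalso
            have := hAE m (List.mem_append_left _ (by simpa using hmr)) M
              (List.mem_append_left _ (by simpa using hM'))
            omega
          · have : (vals.take k ++ vals.drop (k + 1)).count m = 0 :=
              List.count_eq_zero.mpr hmr
            have hc1 : 0 < vals.count m := List.count_pos_iff.mpr hmv
            omega
        exact Or.inr ⟨by omega, by exact_mod_cast hcnt⟩
    · rintro (⟨hMm, hcM⟩ | ⟨hm1', hcm⟩)
      · -- delete one occurrence of the unique maximal count M = m + 1
        obtain ⟨k, hk, hkM⟩ := List.getElem_of_mem hMv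
        refine ⟨k, hk, ?_⟩
        have hcM' : vals.count M = 1 := by exact_mod_cast hcM
        rw [if_pos (by omega : 1 < vals[k])]
        rw [pyAllEqual_iff]
        have hrm : ∀ z ∈ (vals.take k ++ vals.drop (k + 1)) ++ [vals[k] - 1], z = m := by
          intro z hz
          rcases List.mem_append.mp hz with h | h
          · have hzv : z ∈ vals := mem_of_mem_del vals k z h
            rcases hall z hzv with h' | h'
            · exact h'
            · exfalso
              have h0 := count_del vals k hk M
              rw [if_pos hkM] at h0
              have : 0 < (vals.take k ++ vals.drop (k + 1)).count M :=
                List.count_pos_iff.mpr (h' ▸ h)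
              omega
          · have := List.mem_singleton.mp h
            omega
        intro x hx y hy
        rw [hrm x hx, hrm y hy]
      · -- delete the unique count 1 = m entirely
        obtain ⟨k, hk, hkm⟩ := List.getElem_of_mem hmv
        refine ⟨k, hk, ?_⟩
        have hcm' : vals.count m = 1 := by exact_mod_cast hcm
        rw [if_neg (by omega : ¬ 1 < vals[k])]
        rw [pyAllEqual_iff]
        have hrm : ∀ z ∈ (vals.take k ++ vals.drop (k + 1)) ++ ([] : List Int), z = M := by
          intro z hz
          rcases List.mem_append.mp hz with h | h
          · have hzv : z ∈ vals := mem_of_mem_del vals k z h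
            rcases hall z hzv with h' | h'
            · exfalso
              have h0 := count_del vals k hk m
              rw [if_pos hkm] at h0
              have : 0 < (vals.take k ++ vals.drop (k + 1)).count m :=
                List.count_pos_iff.mpr (h' ▸ h)
              omega
            · exact h'
          · cases h
        intro x hx y hy
        rw [hrm x hx, hrm y hy]

-- the central fact: on any list of positive counts the two decision procedures agree
theorem sherDecide_eq (vals : List Int) (hpos : ∀ v ∈ vals, 1 ≤ v) :
    sherFreqDecide vals = sherDeleteDecide vals := by
  have hnd := PySem.Set.nodup_ofList vals
  have hmem : ∀ v, v ∈ PySem.Set.ofList vals ↔ v ∈ vals := fun v => PySem.Set.mem_ofList vals v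
  rcases hS : PySem.Set.ofList vals with _ | ⟨a, _ | ⟨b, _ | ⟨c, rest⟩⟩⟩
  · -- no distinct count : vals = []
    have hv : vals = [] := by
      cases hvals : vals with
      | nil => rfl
      | cons v vs =>
        exfalso
        have := (hmem v).mpr (by rw [hvals]; exact List.mem_cons_self)
        rw [hS] at this
        cases this
    rw [hv]
    rfl
  · -- one distinct count
    rw [hS] at hmem
    have ha : a ∈ vals := (hmem a).mp List.mem_cons_self
    have hall : ∀ v ∈ vals, v = a := fun v hv => by
      have := (hmem v).mpr hv
      simpa using this
    rw [freq_k1 vals a hS, del_k1 vals a ha hall]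
  · -- two distinct counts
    rw [hS] at hmem hnd
    have hab : a ≠ b := by simp at hnd; tauto
    have ha : a ∈ vals := (hmem a).mp (by simp)
    have hb : b ∈ vals := (hmem b).mp (by simp)
    have hall : ∀ v ∈ vals, v = min a b ∨ v = max a b := by
      intro v hv
      have := (hmem v).mpr hv
      simp at this
      rcases this with h | h <;> rcases le_total a b with hle | hle <;>
        simp [hle, h]
    have hmv : min a b ∈ vals := by rcases min_choice a b with h | h <;> rw [h] <;> assumption
    have hMv : max a b ∈ vals := by rcases max_choice a b with h | h <;> rw [h] <;> assumption
    rw [freq_k2 vals a b hS,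
      del_k2 vals (min a b) (max a b) (min_lt_max.mpr hab) hmv hMv hall hpos]
  · -- three or more distinct counts
    rw [hS] at hmem hnd
    simp at hnd
    exact (freq_k3 vals a b c rest hS).trans
      (del_k3 vals a b c ((hmem a).mp (by simp)) ((hmem b).mp (by simp)) ((hmem c).mp (by simp))
        (by tauto) (by tauto) (by tauto)).symm

-- positivity of counter values
lemma counter_values_pos (cs : List Char) :
    ∀ v ∈ (cs.foldl (fun d c => d.insert c (d.getD c 0 + 1)) (PySem.Dict.empty : PySem.Dict Char Int)).values, 1 ≤ v := by
  intro v hv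
  rw [PySem.Dict.foldl_insert_getD_add_one_eq_counter] at hv
  have : v ∈ (PySem.Dict.counter cs).items.map (·.2) := hv
  rw [PySem.Dict.items_counter, List.map_map] at this
  rcases List.mem_map.mp this with ⟨k, hk, hkv⟩
  have hmem : k ∈ cs := (PySem.Set.mem_ofList cs k).mp hk
  have : 0 < cs.count k := List.count_pos_iff.mpr hmem
  simp only [Function.comp_apply] at hkv
  omega

-- ===== VERDICT (by name: the statement is the Claim_ definition above) =====
theorem SherlockValidString_spec : Claim_equal_SherlockValidString := by
  intro s _
  unfold Spec_SherlockValidString SherlockValidString SherlockValidString_alt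
  exact sherDecide_eq _ (counter_values_pos s.toList)
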